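-- pv_equiv track=rewrite | github.com/marianavalerio/M3_Ionizable_Lipids_draft | Lipid_parameters/Literature_known_lipids/MC3/Parameterize.py | make_angle_bond_dicts
-- ===== SOURCE A (Python) =====
-- def make_angle_bond_dicts(ang_tgts, dist_tgts, bead_names):
--     D_ang = {}
--     for idx, a in enumerate(ang_tgts):
--         loc_ang = []
--         for i in a:
--             for idj, j in enumerate(bead_names):
--                 if i in j:
--                     loc_ang.append(idj+1)
--         D_ang[idx+1] = loc_ang
--
--     D_bond = {}
--     for idx, a in enumerate(dist_tgts):
--         loc = []
--         for i in a:
--             for idj, j in enumerate(bead_names):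
--                 if i in j:
--                     loc.append(idj+1)
--         D_bond[idx+1] = loc
--     return D_ang, D_bond
-- ===== SOURCE B (Python) =====
-- def make_angle_bond_dicts(ang_tgts, dist_tgts, bead_names):
--     memo = {}
--     for tgt in ang_tgts + dist_tgts:
--         for e in tgt:
--             if e not in memo:
--                 memo[e] = [k + 1 for k, name in enumerate(bead_names) if e in name]
--     D_ang = {n + 1: [m for e in tgt for m in memo[e]] for n, tgt in enumerate(ang_tgts)}
--     D_bond = {n + 1: [m for e in tgt for m in memo[e]] for n, tgt in enumerate(dist_tgts)}
--     return D_ang, D_bond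
-- ===== Notes on version B (the rewrite author's own statement) =====
-- stated objective: faster
-- what changed: B builds a memo dict mapping each distinct target element to its list of matching bead indices once, then assembles both result dicts by lookup, instead of A's rescan of bead_names for every element occurrence in every target.
import Mathlib
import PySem

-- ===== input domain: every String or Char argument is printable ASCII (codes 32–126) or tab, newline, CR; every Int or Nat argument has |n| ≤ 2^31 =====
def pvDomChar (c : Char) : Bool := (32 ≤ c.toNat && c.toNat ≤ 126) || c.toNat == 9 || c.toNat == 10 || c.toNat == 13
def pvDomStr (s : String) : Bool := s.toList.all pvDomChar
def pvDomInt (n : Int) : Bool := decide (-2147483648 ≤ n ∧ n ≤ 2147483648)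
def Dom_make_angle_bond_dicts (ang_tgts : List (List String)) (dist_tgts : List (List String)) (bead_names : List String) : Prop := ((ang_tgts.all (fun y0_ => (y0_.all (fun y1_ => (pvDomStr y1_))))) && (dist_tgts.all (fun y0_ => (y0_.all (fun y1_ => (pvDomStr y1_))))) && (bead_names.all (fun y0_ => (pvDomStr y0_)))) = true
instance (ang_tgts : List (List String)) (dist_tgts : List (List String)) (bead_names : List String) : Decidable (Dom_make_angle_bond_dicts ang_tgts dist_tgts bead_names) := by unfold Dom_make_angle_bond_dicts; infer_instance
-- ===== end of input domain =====

-- B replaces A's per-target rescans of bead_names with a memo dict built once per distinct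
-- element, then assembles both dicts by lookup (objective: faster, constant-factor on repeats).

-- ===== PORT A =====
def make_angle_bond_dicts (ang_tgts : List (List String)) (dist_tgts : List (List String)) (bead_names : List String) : (List (Int × List Int)) × (List (Int × List Int)) :=
  let D_ang := (PySem.List.enumerate ang_tgts).foldl (fun d p =>
      let loc_ang := p.2.foldl (fun loc i =>
          (PySem.List.enumerate bead_names).foldl (fun loc q =>
              if PySem.Str.isIn i q.2 then loc ++ [q.1 + 1] else loc) loc) []
      d.insert (p.1 + 1) loc_ang) PySem.Dict.empty
  let D_bond := (PySem.List.enumerate dist_tgts).foldl (fun d p =>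
      let loc := p.2.foldl (fun loc i =>
          (PySem.List.enumerate bead_names).foldl (fun loc q =>
              if PySem.Str.isIn i q.2 then loc ++ [q.1 + 1] else loc) loc) []
      d.insert (p.1 + 1) loc) PySem.Dict.empty
  (D_ang.items, D_bond.items)

-- ===== PORT B =====
-- [k + 1 for k, name in enumerate(bead_names) if e in name]
def pvMatchList (bead_names : List String) (e : String) : List Int :=
  ((PySem.List.enumerate bead_names).filter (fun q => PySem.Str.isIn e q.2)).map (fun q => q.1 + 1)

-- the memo-building double loop over ang_tgts + dist_tgts
def pvMemo (ang_tgts dist_tgts : List (List String)) (bead_names : List String) : PySem.Dict String (List Int) :=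
  (ang_tgts ++ dist_tgts).foldl (fun m tgt => tgt.foldl (fun m e =>
      if m.contains e then m else m.insert e (pvMatchList bead_names e)) m) PySem.Dict.empty

def make_angle_bond_dicts_alt (ang_tgts : List (List String)) (dist_tgts : List (List String)) (bead_names : List String) : (List (Int × List Int)) × (List (Int × List Int)) :=
  let memo := pvMemo ang_tgts dist_tgts bead_names
  -- memo[e] ported as getD e []: every e looked up was inserted by the memo loop, so the
  -- default is never taken (proved in pvMemo_getD below) and the port is exact.
  let D_ang := (PySem.List.enumerate ang_tgts).map (fun p => (p.1 + 1, p.2.flatMap (fun e => memo.getD e [])))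
  let D_bond := (PySem.List.enumerate dist_tgts).map (fun p => (p.1 + 1, p.2.flatMap (fun e => memo.getD e [])))
  (D_ang, D_bond)

-- ===== PRECONDITION & SPEC =====
def Spec_make_angle_bond_dicts (ang_tgts : List (List String)) (dist_tgts : List (List String)) (bead_names : List String) (out : (List (Int × List Int)) × (List (Int × List Int))) : Prop := out = make_angle_bond_dicts_alt ang_tgts dist_tgts bead_names
instance (ang_tgts : List (List String)) (dist_tgts : List (List String)) (bead_names : List String) (out : (List (Int × List Int)) × (List (Int × List Int))) : Decidable (Spec_make_angle_bond_dicts ang_tgts dist_tgts bead_names out) := by unfold Spec_make_angle_bond_dicts; infer_instance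

-- ===== CLAIM (what is proved, stated in full; the proofs are below) =====
def Claim_equal_make_angle_bond_dicts : Prop := ∀ (ang_tgts : List (List String)) (dist_tgts : List (List String)) (bead_names : List String), Dom_make_angle_bond_dicts ang_tgts dist_tgts bead_names → Spec_make_angle_bond_dicts ang_tgts dist_tgts bead_names (make_angle_bond_dicts ang_tgts dist_tgts bead_names)

-- ===== LEMMAS AND PROOFS =====

-- A's loc accumulation for one target equals a flatMap of the per-element match lists
theorem pvLoc_eq (bead_names : List String) (a : List String) (acc : List Int) :
    a.foldl (fun loc i =>
        (PySem.List.enumerate bead_names).foldl (fun loc q =>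
            if PySem.Str.isIn i q.2 then loc ++ [q.1 + 1] else loc) loc) acc
      = acc ++ a.flatMap (pvMatchList bead_names) := by
  rw [PySem.List.foldl_congr_mem a _ (fun loc i => loc ++ pvMatchList bead_names i) acc
        (by intro acc i _; exact PySem.List.foldl_append_if _ _ _ _),
      PySem.List.foldl_append_eq_flatMap]

-- invariant of the memo fold over one target list
theorem pvMemo_inner (f : String → List Int) (tgt : List String)
    (m : PySem.Dict String (List Int))
    (H : ∀ k v, m.get? k = some v → v = f k) :
    (∀ k v, (tgt.foldl (fun m e => if m.contains e then m else m.insert e (f e)) m).get? k = some v → v = f k)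
    ∧ (∀ e, (m.contains e = true ∨ e ∈ tgt) →
        (tgt.foldl (fun m e => if m.contains e then m else m.insert e (f e)) m).contains e = true) := by
  induction tgt generalizing m with
  | nil =>
      refine ⟨H, fun e he => ?_⟩
      simpa using he.resolve_right (by simp)
  | cons x xs ih =>
      simp only [List.foldl_cons]
      by_cases hc : m.contains x = true
      · simp only [hc, if_true]
        refine ⟨(ih m H).1, fun e he => (ih m H).2 e ?_⟩
        rcases he with h | h
        · exact Or.inl h
        · rcases List.mem_cons.mp h with rfl | h
          · exact Or.inl hc
          · exact Or.inr h
      · simp only [hc]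
        have H' : ∀ k v, (m.insert x (f x)).get? k = some v → v = f k := by
          intro k v hv
          rw [PySem.Dict.get?_insert] at hv
          split at hv
          · cases hv; subst ‹k = x›; rfl
          · exact H k v hv
        refine ⟨(ih _ H').1, fun e he => (ih _ H').2 e ?_⟩
        rcases he with h | h
        · exact Or.inl (by rw [PySem.Dict.contains_insert]; simp [h])
        · rcases List.mem_cons.mp h with rfl | h
          · exact Or.inl (by rw [PySem.Dict.contains_insert]; simp)
          · exact Or.inr h

-- invariant of the memo fold over the list of targets
theorem pvMemo_outer (f : String → List Int) (L : List (List String))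
    (m : PySem.Dict String (List Int))
    (H : ∀ k v, m.get? k = some v → v = f k) :
    (∀ k v, (L.foldl (fun m tgt => tgt.foldl (fun m e => if m.contains e then m else m.insert e (f e)) m) m).get? k = some v → v = f k)
    ∧ (∀ e, (m.contains e = true ∨ ∃ tgt ∈ L, e ∈ tgt) →
        (L.foldl (fun m tgt => tgt.foldl (fun m e => if m.contains e then m else m.insert e (f e)) m) m).contains e = true) := by
  induction L generalizing m with
  | nil =>
      refine ⟨H, fun e he => ?_⟩
      simpa using he.resolve_right (by simp)
  | cons t ts ih =>
      simp only [List.foldl_cons]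
      obtain ⟨H1, H2⟩ := pvMemo_inner f t m H
      refine ⟨(ih _ H1).1, fun e he => (ih _ H1).2 e ?_⟩
      rcases he with h | ⟨tgt, htgt, he⟩
      · exact Or.inl (H2 e (Or.inl h))
      · rcases List.mem_cons.mp htgt with rfl | htgt
        · exact Or.inl (H2 e (Or.inr he))
        · exact Or.inr ⟨tgt, htgt, he⟩

-- the memo lookup returns exactly the match list for any element of any target
theorem pvMemo_getD (ang_tgts dist_tgts : List (List String)) (bead_names : List String)
    (e : String) (h : ∃ tgt ∈ ang_tgts ++ dist_tgts, e ∈ tgt) :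
    (pvMemo ang_tgts dist_tgts bead_names).getD e [] = pvMatchList bead_names e := by
  obtain ⟨H1, H2⟩ := pvMemo_outer (pvMatchList bead_names) (ang_tgts ++ dist_tgts)
    PySem.Dict.empty (by intro k v hv; simp [PySem.Dict.get?_empty] at hv)
  have hc := H2 e (Or.inr h)
  rw [PySem.Dict.contains_eq_isSome_get?] at hc
  obtain ⟨v, ho⟩ := Option.isSome_iff_exists.mp hc
  unfold pvMemo
  rw [PySem.Dict.getD_eq_get?_getD, ho, Option.getD_some]
  exact H1 e v ho

theorem pvFlatMap_congr {α β : Type} (l : List α) (g h : α → List β)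
    (H : ∀ x ∈ l, g x = h x) : l.flatMap g = l.flatMap h := by
  induction l with
  | nil => rfl
  | cons x xs ih =>
      simp only [List.flatMap_cons, H x (List.mem_cons_self ..),
        ih (fun y hy => H y (List.mem_cons_of_mem _ hy))]

-- the key list of an insert fold over an enumerate is Nodup
theorem pvKeysNodup {α : Type} (l : List α) :
    ((PySem.List.enumerate l).map (fun p => p.1 + 1)).Nodup := by
  have h := PySem.List.pairwise_lt_enumerate (xs := l) (s := 0)
  exact (List.pairwise_map.mpr (h.imp (by intro a b hab; omega)))

-- one side (a dict-building fold over enumerate) equals B's map form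
theorem pvSide_eq (tgts : List (List String)) (bead_names : List String)
    (memo : PySem.Dict String (List Int))
    (Hm : ∀ e, (∃ tgt ∈ tgts, e ∈ tgt) → memo.getD e [] = pvMatchList bead_names e) :
    ((PySem.List.enumerate tgts).foldl (fun d p =>
        d.insert (p.1 + 1) (p.2.foldl (fun loc i =>
            (PySem.List.enumerate bead_names).foldl (fun loc q =>
                if PySem.Str.isIn i q.2 then loc ++ [q.1 + 1] else loc) loc) [])) PySem.Dict.empty).items
      = (PySem.List.enumerate tgts).map (fun p => (p.1 + 1, p.2.flatMap (fun e => memo.getD e []))) := by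
  rw [PySem.Dict.items_foldl_insert_fresh (PySem.List.enumerate tgts)
        (fun p => p.1 + 1)
        (fun p => p.2.foldl (fun loc i =>
            (PySem.List.enumerate bead_names).foldl (fun loc q =>
                if PySem.Str.isIn i q.2 then loc ++ [q.1 + 1] else loc) loc) [])
        PySem.Dict.empty
        (by intro a _; simp [PySem.Dict.contains_empty]) (pvKeysNodup tgts)]
  rw [show (PySem.Dict.empty : PySem.Dict Int (List Int)).items = [] from rfl, List.nil_append]
  refine List.map_congr_left ?_
  intro p hp
  have hp2 : p.2 ∈ tgts := by
    rcases (PySem.List.mem_enumerate_iff _ _ _).mp hp with ⟨k, hk, rfl⟩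
    exact List.getElem_mem hk
  have : p.2.flatMap (fun e => memo.getD e []) = p.2.flatMap (pvMatchList bead_names) :=
    pvFlatMap_congr _ _ _ (fun e he => Hm e ⟨p.2, hp2, he⟩)
  rw [this, pvLoc_eq, List.nil_append]

-- ===== VERDICT (by name: the statement is the Claim_ definition above) =====
theorem make_angle_bond_dicts_spec : Claim_equal_make_angle_bond_dicts := by
  intro ang_tgts dist_tgts bead_names _
  unfold Spec_make_angle_bond_dicts make_angle_bond_dicts make_angle_bond_dicts_alt
  refine Prod.ext ?_ ?_ <;> simp only
  · exact pvSide_eq ang_tgts bead_names _ (fun e ⟨t, ht, he⟩ =>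
      pvMemo_getD ang_tgts dist_tgts bead_names e ⟨t, List.mem_append_left _ ht, he⟩)
  · exact pvSide_eq dist_tgts bead_names _ (fun e ⟨t, ht, he⟩ =>
      pvMemo_getD ang_tgts dist_tgts bead_names e ⟨t, List.mem_append_right _ ht, he⟩)
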